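-- pv_equiv track=rewrite | github.com/eukaryo/connect4-semi-strong-experiment | alphabeta.py | moveseq_to_board_42
-- ===== SOURCE A (Python) =====
-- def moveseq_to_board_42(moveseq: str, width: int = 7, height: int = 6) -> str:
--     """
--     Convert a connect4 move sequence (string of digits) into a 42-char board string.
--
--     - Board indexing: rows top->bottom, cols left->right (same orientation as typical printouts).
--     - Cell chars: '.' empty, 'x' first player, 'o' second player.
--     - Raises ValueError on illegal moves (column full) or invalid digits.
--
--     Example:
--         moveseq_to_board_42("3333332")
--     """
--     # board[row][col], row=0 top ... height-1 bottom
--     board: list[list[str]] = [["."] * width for _ in range(height)]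
--     heights = [0] * width  # number of stones already in each column (from bottom)
--
--     for ply, ch in enumerate(moveseq):
--         if not ("0" <= ch <= "9"):
--             raise ValueError(f"Invalid move character {ch!r} at ply={ply}")
--         col = ord(ch) - ord("0")
--         if not (0 <= col < width):
--             raise ValueError(f"Move out of range: {col} at ply={ply} (width={width})")
--
--         if heights[col] >= height:
--             raise ValueError(f"Illegal move: column {col} is full at ply={ply}")
--
--         row_from_bottom = heights[col]  # 0 means bottom row
--         row = height - 1 - row_from_bottom
--         stone = "x" if (ply % 2 == 0) else "o"
--
--         board[row][col] = stone
--         heights[col] += 1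
--
--     return "".join("".join(board[r]) for r in range(height))
-- ===== SOURCE B (Python) =====
-- def _nth_occurrence(s, ch, k):
--     # index of the k-th (0-based) occurrence of ch in s, or None
--     for i, c in enumerate(s):
--         if c == ch:
--             if k == 0:
--                 return i
--             k -= 1
--     return None
--
--
-- def moveseq_to_board_42(moveseq: str, width: int = 7, height: int = 6) -> str:
--     # Stateless: validate each ply against the prefix occurrence count, then
--     # compute every cell directly from the index of the k-th occurrence of its
--     # column's digit (parity of that ply index gives the stone). No board is
--     # ever simulated.
--     for ply, ch in enumerate(moveseq):
--         if not ("0" <= ch <= "9"):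
--             raise ValueError(f"Invalid move character {ch!r} at ply={ply}")
--         col = ord(ch) - ord("0")
--         if not (0 <= col < width):
--             raise ValueError(f"Move out of range: {col} at ply={ply} (width={width})")
--         if moveseq[:ply].count(ch) >= height:
--             raise ValueError(f"Illegal move: column {col} is full at ply={ply}")
--
--     cells = []
--     for r in range(height):
--         k = height - 1 - r
--         for c in range(width):
--             ply = _nth_occurrence(moveseq, chr(48 + c), k)
--             cells.append("." if ply is None else ("x" if ply % 2 == 0 else "o"))
--     return "".join(cells)
-- ===== Notes on version B (the rewrite author's own statement) =====
-- stated objective: alternative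
-- what changed: B does not simulate a board at all: it validates each ply against the prefix occurrence count of its digit, then computes every cell directly from the index of the k-th occurrence of the cell's column digit in the move string (stone by parity of that index), whereas A maintains a mutable grid plus a heights array.
import Mathlib
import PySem

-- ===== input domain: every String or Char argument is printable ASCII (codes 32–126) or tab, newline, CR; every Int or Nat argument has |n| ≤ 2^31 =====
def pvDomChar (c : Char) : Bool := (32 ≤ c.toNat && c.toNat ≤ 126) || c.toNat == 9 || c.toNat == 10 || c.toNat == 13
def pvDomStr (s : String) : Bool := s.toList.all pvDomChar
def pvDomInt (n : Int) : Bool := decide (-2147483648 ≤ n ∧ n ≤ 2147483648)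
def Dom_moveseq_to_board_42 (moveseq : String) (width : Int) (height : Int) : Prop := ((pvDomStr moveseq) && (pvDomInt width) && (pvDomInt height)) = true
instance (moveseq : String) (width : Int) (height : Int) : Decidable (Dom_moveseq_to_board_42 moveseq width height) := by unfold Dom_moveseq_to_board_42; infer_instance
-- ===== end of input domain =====

-- B simulates no board at all: it validates plies by prefix occurrence counts and then
-- computes each cell directly from the k-th occurrence index of its column digit
-- (objective: alternative algorithm, same result).

-- ===== PORT A =====
-- State: (board rows top->bottom, heights per column); none models a raised ValueError.
def pvStepA (width height : Int) (st : Option (List (List Char) × List Nat)) (pc : Int × Char) :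
    Option (List (List Char) × List Nat) :=
  match st with
  | none => none
  | some (board, heights) =>
    let ply : Int := pc.1
    let ch := pc.2
    if ¬('0' ≤ ch ∧ ch ≤ '9') then none
    else
      let col : Int := (ch.toNat : Int) - 48
      if ¬(0 ≤ col ∧ col < width) then none
      else
        let c := col.toNat
        if ((heights.getD c 0 : Int)) ≥ height then none
        else
          let rowFromBottom := heights.getD c 0
          let row := height.toNat - 1 - rowFromBottom
          let stone : Char := if ply % 2 == 0 then 'x' else 'o'
          some (board.set row ((board.getD row []).set c stone), heights.set c (rowFromBottom + 1))

def moveseq_to_board_42 (moveseq : String) (width : Int) (height : Int) : String :=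
  match (PySem.List.enumerate moveseq.toList).foldl (pvStepA width height)
      (some (List.replicate height.toNat (List.replicate width.toNat '.'),
             List.replicate width.toNat 0)) with
  | none => ""
  | some (board, _) => String.ofList ((List.range height.toNat).flatMap (fun r => board.getD r []))

-- ===== PORT B =====
-- _nth_occurrence(s, ch, k): index of the k-th occurrence of ch in s, or none.
def pvNthOcc (l : List Char) (ch : Char) (k : Nat) (i : Nat) : Option Nat :=
  match l with
  | [] => none
  | c :: rest =>
    if c == ch then (if k == 0 then some i else pvNthOcc rest ch (k - 1) (i + 1))
    else pvNthOcc rest ch k (i + 1)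

-- B's validation loop body; none models a raised ValueError, the state carries nothing.
def pvCheckB (width height : Int) (ms : List Char) (st : Option Unit) (pc : Int × Char) :
    Option Unit :=
  match st with
  | none => none
  | some _ =>
    let ply : Int := pc.1
    let ch := pc.2
    if ¬('0' ≤ ch ∧ ch ≤ '9') then none
    else
      let col : Int := (ch.toNat : Int) - 48
      if ¬(0 ≤ col ∧ col < width) then none
      else if (((ms.take ply.toNat).count ch : Int)) ≥ height then none
      else some ()

-- body of B's cell comprehension: '.' if no k-th occurrence, else stone by ply parity
def pvCellB (ms : List Char) (height : Int) (r c : Nat) : Char :=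
  match pvNthOcc ms (Char.ofNat (48 + c)) (height.toNat - 1 - r) 0 with
  | none => '.'
  | some i => if i % 2 == 0 then 'x' else 'o'

def moveseq_to_board_42_alt (moveseq : String) (width : Int) (height : Int) : String :=
  match (PySem.List.enumerate moveseq.toList).foldl
      (pvCheckB width height moveseq.toList) (some ()) with
  | none => ""
  | some _ =>
      String.ofList ((List.range height.toNat).flatMap (fun r =>
        (List.range width.toNat).map (fun c => pvCellB moveseq.toList height r c)))

-- ===== PRECONDITION & SPEC =====
-- Pre_ excludes exactly the inputs on which the Python A raises ValueError
-- (non-digit move character, column index ≥ width, or a column receiving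
-- more stones than height allows).
def Pre_moveseq_to_board_42 (moveseq : String) (width : Int) (height : Int) : Prop :=
  ∀ i ∈ List.range moveseq.toList.length,
    ('0' ≤ moveseq.toList.getD i ' ' ∧ moveseq.toList.getD i ' ' ≤ '9') ∧
    ((moveseq.toList.getD i ' ').toNat : Int) - 48 < width ∧
    (((moveseq.toList.take i).count (moveseq.toList.getD i ' ') : Int)) < height
instance (moveseq : String) (width : Int) (height : Int) : Decidable (Pre_moveseq_to_board_42 moveseq width height) := by unfold Pre_moveseq_to_board_42; infer_instance

def pvWitness_moveseq_to_board_42 : String × Int × Int := ("3333332", 7, 6)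

def Spec_moveseq_to_board_42 (moveseq : String) (width : Int) (height : Int) (out : String) : Prop := out = moveseq_to_board_42_alt moveseq width height
instance (moveseq : String) (width : Int) (height : Int) (out : String) : Decidable (Spec_moveseq_to_board_42 moveseq width height out) := by unfold Spec_moveseq_to_board_42; infer_instance

-- ===== CLAIM (what is proved, stated in full; the proofs are below) =====
def Claim_equal_moveseq_to_board_42 : Prop := ∀ (moveseq : String) (width : Int) (height : Int), Dom_moveseq_to_board_42 moveseq width height → Pre_moveseq_to_board_42 moveseq width height → Spec_moveseq_to_board_42 moveseq width height (moveseq_to_board_42 moveseq width height)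

-- ===== LEMMAS AND PROOFS =====

lemma pvGetD_set_self {α : Type} (l : List α) (i : Nat) (v d : α) (h : i < l.length) :
    (l.set i v).getD i d = v := by
  simp [List.getD, h]

lemma pvGetD_set_ne {α : Type} (l : List α) (i j : Nat) (v d : α) (h : j ≠ i) :
    (l.set i v).getD j d = l.getD j d := by
  simp [List.getD, List.getElem?_set_ne (Ne.symm h)]

lemma pvFlatMap_congr {α β : Type} (l : List α) (f g : α → List β)
    (h : ∀ x ∈ l, f x = g x) : l.flatMap f = l.flatMap g := by
  induction l with
  | nil => rfl
  | cons x xs ih =>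
    simp only [List.flatMap_cons, h x (by simp), ih (fun y hy => h y (by simp [hy]))]

-- appending one character shifts pvNthOcc exactly at k = the old occurrence count
lemma pvNthOcc_append (l : List Char) (a ch : Char) (k i : Nat) :
    pvNthOcc (l ++ [a]) ch k i =
      if a = ch ∧ k = l.count ch then some (i + l.length) else pvNthOcc l ch k i := by
  induction l generalizing k i with
  | nil =>
    simp only [List.nil_append, List.count_nil, List.length_nil, Nat.add_zero, pvNthOcc]
    by_cases ha : a = ch
    · subst ha
      by_cases hk : k = 0 <;> simp [hk]
    · simp [ha, beq_iff_eq]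
  | cons c rest ih =>
    simp only [List.cons_append, pvNthOcc, List.count_cons, List.length_cons]
    by_cases hc : c = ch
    · subst hc
      simp only [beq_self_eq_true, if_pos]
      by_cases hk : k = 0
      · subst hk
        simp
      · simp only [ih]
        by_cases hcond : a = c ∧ k - 1 = rest.count c
        · have : a = c ∧ k = rest.count c + 1 := ⟨hcond.1, by omega⟩
          simp [hcond.1, this.2]
          omega
        · have : ¬(a = c ∧ k = rest.count c + 1) := by
            rintro ⟨h1, h2⟩; exact hcond ⟨h1, by omega⟩
          simp [hcond, this]
    · have hbeq : (c == ch) = false := by simp [hc]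
      simp only [hbeq, Bool.false_eq_true, if_false, ih]
      by_cases hcond : a = ch ∧ k = rest.count ch <;> simp [hcond] <;> try omega

-- for a digit x, Char.ofNat (48+c) = x exactly when c is x's column
lemma pvDchar_eq_iff (x : Char) (hx : '0' ≤ x ∧ x ≤ '9') (c : Nat) :
    Char.ofNat (48 + c) = x ↔ 48 + c = x.toNat := by
  have hx48 : 48 ≤ x.toNat ∧ x.toNat ≤ 57 := by
    obtain ⟨h1, h2⟩ := hx
    exact ⟨h1, h2⟩
  by_cases hv : Nat.isValidChar (48 + c)
  · constructor
    · intro h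
      have := congrArg Char.toNat h
      rwa [show (Char.ofNat (48 + c)).toNat = 48 + c by simp [Char.ofNat, hv]] at this
    · intro h
      have : Char.ofNat (48 + c) = Char.ofNat x.toNat := by rw [h]
      rwa [Char.ofNat_toNat] at this
  · constructor
    · intro h
      have := congrArg Char.toNat h
      rw [show (Char.ofNat (48 + c)).toNat = 0 by simp [Char.ofNat, hv]] at this
      omega
    · intro h
      exfalso
      exact hv (by rw [h]; exact Or.inl (by omega))

-- the simulation invariant: A's (board, heights) after the prefix ms is determined
-- by occurrence counts and pvCellB over ms
def pvInv (width height : Int) (ms : List Char) (board : List (List Char))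
    (heights : List Nat) : Prop :=
  board.length = height.toNat ∧ heights.length = width.toNat ∧
  (∀ r, r < height.toNat → (board.getD r []).length = width.toNat) ∧
  (∀ c, c < width.toNat → heights.getD c 0 = ms.count (Char.ofNat (48 + c))) ∧
  (∀ r c, r < height.toNat → c < width.toNat →
    (board.getD r []).getD c '.' = pvCellB ms height r c)

def pvRel (width height : Int) (ms : List Char)
    (sA : Option (List (List Char) × List Nat)) (sB : Option Unit) : Prop :=
  (sA = none ∧ sB = none) ∨
  ∃ b hs, sA = some (b, hs) ∧ sB = some () ∧ pvInv width height ms b hs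

lemma pvStep_rel (width height : Int) (xs : List Char) (x : Char)
    (sA : Option (List (List Char) × List Nat)) (sB : Option Unit)
    (hrel : pvRel width height xs sA sB) :
    pvRel width height (xs ++ [x])
      (pvStepA width height sA ((xs.length : Int), x))
      (pvCheckB width height (xs ++ [x]) sB ((xs.length : Int), x)) := by
  rcases hrel with ⟨hA, hB⟩ | ⟨b, hs, hA, hB, hinv⟩
  · subst hA; subst hB; exact Or.inl ⟨rfl, rfl⟩
  · subst hA; subst hB
    obtain ⟨hbl, hhl, hrowlen, hcnt, hcell⟩ := hinv
    simp only [pvStepA, pvCheckB]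
    by_cases hch : ('0' ≤ x ∧ x ≤ '9')
    case neg => rw [if_pos hch, if_pos hch]; exact Or.inl ⟨rfl, rfl⟩
    rw [if_neg (not_not_intro hch), if_neg (not_not_intro hch)]
    by_cases hcol : (0 ≤ (x.toNat : Int) - 48 ∧ (x.toNat : Int) - 48 < width)
    case neg => rw [if_pos hcol, if_pos hcol]; exact Or.inl ⟨rfl, rfl⟩
    rw [if_neg (not_not_intro hcol), if_neg (not_not_intro hcol)]
    set c : Nat := ((x.toNat : Int) - 48).toNat with hc
    have hcW : c < width.toNat := by have h1 := hcol.1; have h2 := hcol.2; omega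
    have hdx : Char.ofNat (48 + c) = x := by
      have : 48 + c = x.toNat := by
        have := hch.1; have h48 : 48 ≤ x.toNat := this; omega
      rw [this, Char.ofNat_toNat]
    have htake : ((xs ++ [x]).take ((xs.length : Int)).toNat) = xs := by
      simp
    have hcount : hs.getD c 0 = xs.count x := by rw [hcnt c hcW, hdx]
    rw [htake, hcount]
    by_cases hfull : ((xs.count x : Int)) ≥ height
    · rw [if_pos hfull, if_pos hfull]; exact Or.inl ⟨rfl, rfl⟩
    · rw [if_neg hfull, if_neg hfull]
      refine Or.inr ⟨_, _, rfl, rfl, ?_⟩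
      set L := xs.count x with hL
      have hLH : L < height.toNat := by omega
      set row := height.toNat - 1 - L with hrw
      have hrowH : row < height.toNat := by omega
      refine ⟨by simpa using hbl, by simpa using hhl, ?_, ?_, ?_⟩
      · intro r hr
        by_cases hrr : r = row
        · subst hrr
          rw [pvGetD_set_self _ _ _ _ (by omega)]
          simpa using hrowlen _ hrowH
        · rw [pvGetD_set_ne _ _ _ _ _ hrr]; exact hrowlen r hr
      · intro c' hc'
        have hcnt' : (xs ++ [x]).count (Char.ofNat (48 + c')) =
            xs.count (Char.ofNat (48 + c')) + (if x = Char.ofNat (48 + c') then 1 else 0) := by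
          simp [List.count_append, List.count_singleton]
        by_cases hcc : c' = c
        · subst hcc
          rw [pvGetD_set_self _ _ _ _ (by omega), hcnt', hdx]
          simp [hL]
        · have hne : Char.ofNat (48 + c') ≠ x := by
            intro h
            have h1 := (pvDchar_eq_iff x hch c').mp h
            have h2 := (pvDchar_eq_iff x hch c).mp hdx
            omega
          rw [pvGetD_set_ne _ _ _ _ _ hcc, hcnt', if_neg (fun h => hne h.symm), Nat.add_zero]
          exact hcnt c' hc'
      · intro r c' hr hc'
        have hformula : pvCellB (xs ++ [x]) height r c' =
            if x = Char.ofNat (48 + c') ∧ height.toNat - 1 - r = xs.count (Char.ofNat (48 + c'))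
            then (if (0 + xs.length) % 2 == 0 then 'x' else 'o')
            else pvCellB xs height r c' := by
          unfold pvCellB
          rw [pvNthOcc_append]
          by_cases hcond : x = Char.ofNat (48 + c') ∧
              height.toNat - 1 - r = xs.count (Char.ofNat (48 + c')) <;> simp [hcond]
        have hcondiff : (x = Char.ofNat (48 + c') ∧
            height.toNat - 1 - r = xs.count (Char.ofNat (48 + c'))) ↔ (r = row ∧ c' = c) := by
          constructor
          · rintro ⟨h1, h2⟩
            have hcc : c' = c := by
              have := (pvDchar_eq_iff x hch c').mp h1.symm
              omega
            subst hcc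
            rw [hdx, ← hL] at h2
            exact ⟨by omega, rfl⟩
          · rintro ⟨h1, h2⟩
            subst h1; subst h2
            exact ⟨hdx.symm, by rw [hdx, ← hL]; omega⟩
        rw [hformula]
        by_cases hcond : r = row ∧ c' = c
        · obtain ⟨h1, h2⟩ := hcond
          subst h1; subst h2
          rw [if_pos (hcondiff.mpr ⟨rfl, rfl⟩)]
          rw [pvGetD_set_self _ _ _ _ (by omega),
              pvGetD_set_self _ _ _ _ (by rw [hrowlen _ hrowH]; omega)]
          by_cases hp : xs.length % 2 = 0
          · have h1 : ((xs.length : Int)) % 2 = 0 := by omega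
            simp [hp, h1]
          · have h1 : ¬(((xs.length : Int)) % 2 = 0) := by omega
            simp [hp, h1]
        · rw [if_neg (fun h => hcond (hcondiff.mp h))]
          by_cases hrr : r = row
          · subst hrr
            have hcc : c' ≠ c := fun h => hcond ⟨rfl, h⟩
            rw [pvGetD_set_self _ _ _ _ (by omega), pvGetD_set_ne _ _ _ _ _ hcc]
            exact hcell row c' hrowH hc'
          · rw [pvGetD_set_ne _ _ _ _ _ hrr]
            exact hcell r c' hr hc'

lemma pvFold_rel (width height : Int) (ms : List Char) :
    pvRel width height ms
      ((PySem.List.enumerate ms).foldl (pvStepA width height)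
        (some (List.replicate height.toNat (List.replicate width.toNat '.'),
               List.replicate width.toNat 0)))
      ((PySem.List.enumerate ms).foldl (pvCheckB width height ms) (some ())) := by
  induction ms using List.reverseRecOn with
  | nil =>
    refine Or.inr ⟨_, _, rfl, rfl, by simp, by simp, ?_, ?_, ?_⟩
    · intro r hr; simp [hr]
    · intro c hc; simp [hc]
    · intro r c hr hc; simp [hr, hc, List.getD, pvCellB, pvNthOcc]
  | append_singleton xs x ih =>
    have henum : PySem.List.enumerate (xs ++ [x]) =
        PySem.List.enumerate xs ++ [((xs.length : Int), x)] := by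
      rw [PySem.List.enumerate_append]
      simp [PySem.List.enumerate_cons, PySem.List.enumerate_nil]
    rw [henum, List.foldl_append, List.foldl_append]
    simp only [List.foldl_cons, List.foldl_nil]
    have hcongr : (PySem.List.enumerate xs).foldl (pvCheckB width height (xs ++ [x])) (some ()) =
        (PySem.List.enumerate xs).foldl (pvCheckB width height xs) (some ()) := by
      apply PySem.List.foldl_congr_mem
      intro acc p hp
      rcases (PySem.List.mem_enumerate_iff _ _ _).mp hp with ⟨k, hk, hpk⟩
      subst hpk
      unfold pvCheckB
      cases acc with
      | none => rfl
      | some _ =>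
        simp only [Int.zero_add]
        rw [List.take_append_of_le_length (by simp; omega)]
    rw [hcongr]
    exact pvStep_rel width height xs x _ _ ih

-- ===== VERDICT (by name: the statement is the Claim_ definition above) =====
theorem moveseq_to_board_42_spec : Claim_equal_moveseq_to_board_42 := by
  intro moveseq width height _ _
  unfold Spec_moveseq_to_board_42 moveseq_to_board_42 moveseq_to_board_42_alt
  rcases pvFold_rel width height moveseq.toList with ⟨h1, h2⟩ | ⟨b, hs, h1, h2, hinv⟩
  · rw [h1, h2]
  · rw [h1, h2]
    obtain ⟨hbl, hhl, hrowlen, hcnt, hcell⟩ := hinv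
    show String.ofList _ = String.ofList _
    congr 1
    apply pvFlatMap_congr
    intro r hr
    have hrH : r < height.toNat := List.mem_range.mp hr
    apply List.ext_getElem
    · rw [List.length_map, List.length_range]; exact hrowlen r hrH
    · intro i h1 h2
      have hiW : i < width.toNat := by rw [hrowlen r hrH] at h1; exact h1
      simp only [List.getElem_map, List.getElem_range]
      rw [← List.getD_eq_getElem (d := '.') _ h1]
      exact hcell r i hrH hiW
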